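-- pv_equiv track=rewrite | github.com/arnabs542/oj | leetcode/maximumProductOfWordLengths.py | _maxProductNaive
-- ===== SOURCE A (Python) =====
-- def _maxProductNaive(words):
--     max_product = 0
--     word2set = {}
--     for word in words:
--         word2set[word] = set(word)
--     for i, w in enumerate(words):
--         for j in range(i + 1, len(words)):
--             if word2set[w].intersection(word2set[words[j]]):
--                 continue
--             product = len(w) * len(words[j])
--             max_product = max(max_product, product)
--     return max_product
-- ===== SOURCE B (Python) =====
-- def _mask(w):
--     m = 0
--     for c in w:
--         m |= 1 << ord(c)
--     return m
--
--
-- def _maxProductNaive(words):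
--     # Index the words by character-set bitmask, keeping only the longest word
--     # per mask; then take the best product over pairs of distinct dict entries.
--     best_len = {}
--     for w in words:
--         m = _mask(w)
--         if len(w) > best_len.get(m, 0):
--             best_len[m] = len(w)
--     best = 0
--     for m1, l1 in best_len.items():
--         for m2, l2 in best_len.items():
--             if m1 & m2 == 0:
--                 best = max(best, l1 * l2)
--     return best
-- ===== Notes on version B (the rewrite author's own statement) =====
-- stated objective: faster
-- what changed: Instead of A's all-pairs scan over the word list with a set intersection per pair, B builds a hash index from character-set bitmask to the longest word length carrying that mask, and searches products only over pairs of distinct dict entries, so duplicate words and words with identical character sets are compared once and each disjointness test is a single AND.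
import Mathlib
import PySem

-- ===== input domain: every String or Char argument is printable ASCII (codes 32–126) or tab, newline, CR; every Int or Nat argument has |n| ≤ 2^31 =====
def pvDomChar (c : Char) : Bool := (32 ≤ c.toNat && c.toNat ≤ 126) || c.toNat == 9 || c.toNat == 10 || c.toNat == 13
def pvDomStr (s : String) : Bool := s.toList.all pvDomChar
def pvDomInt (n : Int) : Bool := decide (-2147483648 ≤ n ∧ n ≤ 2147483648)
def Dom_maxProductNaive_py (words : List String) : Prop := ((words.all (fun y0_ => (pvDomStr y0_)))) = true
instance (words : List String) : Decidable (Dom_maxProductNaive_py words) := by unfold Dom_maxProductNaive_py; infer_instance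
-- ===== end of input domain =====

-- B replaces A's all-pairs scan over the word list (set intersection per pair) by a hash index:
-- one pass builds a dict mapping each character-set bitmask to the longest word length carrying it,
-- and the product search then runs over pairs of distinct DICT ENTRIES only (faster).

-- ===== PORT A =====
def maxProductNaive_py (words : List String) : Int :=
  -- word2set = {}; for word in words: word2set[word] = set(word)
  let word2set : PySem.Dict String (PySem.Set Char) :=
    words.foldl (fun d word => d.insert word (PySem.Set.ofList word.toList)) PySem.Dict.empty
  -- for i, w in enumerate(words): for j in range(i+1, len(words)): …
  -- word2set[w] / word2set[words[j]] always hit (keys come from words), so getD is exact here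
  (PySem.List.enumerate words 0).foldl
    (fun mp p =>
      (PySem.List.pyRange (p.1 + 1) (PySem.List.len words) 1).foldl
        (fun mp j =>
          let wj := PySem.List.pyGetD words j ""
          if PySem.Set.inter (word2set.getD p.2 []) (word2set.getD wj []) ≠ [] then mp
          else max mp ((PySem.Str.len p.2) * (PySem.Str.len wj)))
        mp)
    0

-- ===== PORT B =====
-- def _mask(w): m = 0; for c in w: m |= 1 << ord(c); return m
def pvMask (w : String) : Nat :=
  w.toList.foldl (fun m c => m ||| (1 <<< c.toNat)) 0

-- best_len = {}; for w in words: m=_mask(w); if len(w) > best_len.get(m,0): best_len[m]=len(w)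
-- best = 0; for m1,l1 in best_len.items(): for m2,l2 in best_len.items(): if m1&m2==0: best=max(best,l1*l2)
def maxProductNaive_py_alt (words : List String) : Int :=
  let bestLen : PySem.Dict Nat Int :=
    words.foldl
      (fun d w =>
        if PySem.Str.len w > d.getD (pvMask w) 0 then d.insert (pvMask w) (PySem.Str.len w) else d)
      PySem.Dict.empty
  bestLen.items.foldl
    (fun best p1 =>
      bestLen.items.foldl
        (fun best p2 => if p1.1 &&& p2.1 == 0 then max best (p1.2 * p2.2) else best)
        best)
    0

-- ===== PRECONDITION & SPEC =====
def Spec_maxProductNaive_py (words : List String) (out : Int) : Prop := out = maxProductNaive_py_alt words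
instance (words : List String) (out : Int) : Decidable (Spec_maxProductNaive_py words out) := by unfold Spec_maxProductNaive_py; infer_instance

-- ===== CLAIM (what is proved, stated in full; the proofs are below) =====
def Claim_equal_maxProductNaive_py : Prop := ∀ (words : List String), Dom_maxProductNaive_py words → Spec_maxProductNaive_py words (maxProductNaive_py words)

-- ===== LEMMAS AND PROOFS =====

-- ---- proof-side intermediate form of A: structural recursion over (len, mask) pairs ----
def pvBest : List (Int × Nat) → Int → Int
  | [], best => best
  | (l1, m1) :: lm, best =>
      pvBest lm
        (lm.foldl (fun b p => if m1 &&& p.2 == 0 && l1 * p.1 > b then l1 * p.1 else b) best)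

-- ordered pairs (earlier, later) of a list
def pvPairs {α : Type} : List α → List (α × α)
  | [] => []
  | x :: xs => xs.map (fun y => (x, y)) ++ pvPairs xs

-- the dict built by A maps each word of the list to set(word)
theorem pv_dict_getD (l : List String) (d : PySem.Dict String (PySem.Set Char)) (w : String) :
    (l.foldl (fun d word => d.insert word (PySem.Set.ofList word.toList)) d).getD w [] =
      if w ∈ l then PySem.Set.ofList w.toList else d.getD w [] := by
  induction l generalizing d with
  | nil => simp
  | cons x xs ih =>
      simp only [List.foldl_cons, ih, PySem.Dict.getD_insert, List.mem_cons]
      by_cases hx : w ∈ xs <;> by_cases he : w = x <;> simp [hx, he]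

-- bit k of pvMask-style fold
theorem pv_testBit_fold (l : List Char) (m0 : Nat) (k : Nat) :
    (l.foldl (fun m c => m ||| (1 <<< c.toNat)) m0).testBit k =
      (m0.testBit k || l.any (fun c => c.toNat == k)) := by
  induction l generalizing m0 with
  | nil => simp
  | cons c cs ih =>
      simp only [List.foldl_cons, ih, List.any_cons]
      rw [Nat.testBit_or, Nat.shiftLeft_eq, one_mul, Nat.testBit_two_pow]
      by_cases h : c.toNat = k <;> simp [h, Bool.or_comm, Bool.or_left_comm]

theorem pv_testBit_mask (w : String) (k : Nat) :
    (pvMask w).testBit k = w.toList.any (fun c => c.toNat == k) := by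
  unfold pvMask; rw [pv_testBit_fold]; simp

-- mask disjointness ↔ no shared character
theorem pv_mask_disjoint (w1 w2 : String) :
    (pvMask w1 &&& pvMask w2 = 0) ↔ ∀ c ∈ w1.toList, c ∉ w2.toList := by
  constructor
  · intro h c hc1 hc2
    have hb : (pvMask w1 &&& pvMask w2).testBit c.toNat = true := by
      rw [Nat.testBit_and, pv_testBit_mask, pv_testBit_mask]
      simp only [Bool.and_eq_true, List.any_eq_true]
      exact ⟨⟨c, hc1, by simp⟩, ⟨c, hc2, by simp⟩⟩
    rw [h] at hb; simp at hb
  · intro h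
    apply Nat.eq_of_testBit_eq
    intro k
    rw [Nat.testBit_and, Nat.zero_testBit, pv_testBit_mask, pv_testBit_mask]
    simp only [Bool.and_eq_false_iff, List.any_eq_false]
    by_cases h1 : ∃ c ∈ w1.toList, c.toNat = k
    · obtain ⟨c, hc, hck⟩ := h1
      right; intro c' hc' hk
      have hck' : c'.toNat = c.toNat := by simp at hk; omega
      have : c' = c := by
        apply Char.ext
        exact UInt32.toNat_inj.mp hck'
      exact h c hc (this ▸ hc')
    · left; intro c hc; simp; intro hk; exact h1 ⟨c, hc, by simpa using hk⟩

-- a word with an empty mask has no characters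
theorem pv_mask_eq_zero (w : String) (h : pvMask w = 0) : w.toList = [] := by
  rw [List.eq_nil_iff_forall_not_mem]
  intro c hc
  have hb : (pvMask w).testBit c.toNat = true := by
    rw [pv_testBit_mask]; exact List.any_eq_true.mpr ⟨c, hc, by simp⟩
  rw [h] at hb; simp at hb

-- per-pair: A's step equals the mask-guarded step
theorem pv_step_eq (w1 w2 : String) (mp : Int) :
    (if PySem.Set.inter (PySem.Set.ofList w1.toList) (PySem.Set.ofList w2.toList) ≠ [] then mp
     else max mp ((PySem.Str.len w1) * (PySem.Str.len w2))) =
    (if pvMask w1 &&& pvMask w2 == 0 && (PySem.Str.len w1) * (PySem.Str.len w2) > mp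
     then (PySem.Str.len w1) * (PySem.Str.len w2) else mp) := by
  have hiff : (PySem.Set.inter (PySem.Set.ofList w1.toList) (PySem.Set.ofList w2.toList) = []) ↔
      (pvMask w1 &&& pvMask w2 = 0) := by
    rw [pv_mask_disjoint, List.eq_nil_iff_forall_not_mem]
    constructor
    · intro h c hc1 hc2
      exact h c (by rw [PySem.Set.mem_inter]; simp [PySem.Set.mem_ofList, hc1, hc2])
    · intro h c hc
      rw [PySem.Set.mem_inter, PySem.Set.mem_ofList, PySem.Set.mem_ofList] at hc
      exact h c hc.1 hc.2
  by_cases hd : PySem.Set.inter (PySem.Set.ofList w1.toList) (PySem.Set.ofList w2.toList) = []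
  · have hm : pvMask w1 &&& pvMask w2 = 0 := hiff.mp hd
    simp only [hd, hm, ne_eq, not_true_eq_false, if_false, beq_self_eq_true, Bool.true_and]
    by_cases hgt : (PySem.Str.len w1) * (PySem.Str.len w2) > mp
    · simp; omega
    · simp; omega
  · have hm : ¬ (pvMask w1 &&& pvMask w2 = 0) := fun h => hd (hiff.mpr h)
    simp [hd, hm]

-- A's whole computation, over the suffix words.drop k, equals pvBest on that suffix
theorem pv_main (words : List String) (l : List String) (k : Nat)
    (hdrop : words.drop k = l) (mp : Int) :
    (PySem.List.enumerate l (k : Int)).foldl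
      (fun mp p =>
        (PySem.List.pyRange (p.1 + 1) (PySem.List.len words) 1).foldl
          (fun mp j =>
            let wj := PySem.List.pyGetD words j ""
            if PySem.Set.inter
                ((words.foldl (fun d word => d.insert word (PySem.Set.ofList word.toList))
                    PySem.Dict.empty).getD p.2 [])
                ((words.foldl (fun d word => d.insert word (PySem.Set.ofList word.toList))
                    PySem.Dict.empty).getD wj []) ≠ [] then mp
            else max mp ((PySem.Str.len p.2) * (PySem.Str.len wj)))
          mp)
      mp =
    pvBest (l.map (fun w => ((PySem.Str.len w), pvMask w))) mp := by
  induction l generalizing k mp with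
  | nil => simp [PySem.List.enumerate, pvBest]
  | cons w rest ih =>
      rw [PySem.List.enumerate_cons, List.foldl_cons]
      have hw : w ∈ words := by
        have := List.mem_of_mem_drop (l := words) (i := k) (a := w) (by rw [hdrop]; simp)
        exact this
      have hdrop' : words.drop (k + 1) = rest := by
        have : words.drop (k+1) = (words.drop k).drop 1 := by rw [List.drop_drop]
        rw [this, hdrop]; simp
      have hinner : ∀ (mp : Int),
          (PySem.List.pyRange ((k : Int) + 1) (PySem.List.len words) 1).foldl
            (fun mp j =>
              let wj := PySem.List.pyGetD words j ""
              if PySem.Set.inter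
                  ((words.foldl (fun d word => d.insert word (PySem.Set.ofList word.toList))
                      PySem.Dict.empty).getD w [])
                  ((words.foldl (fun d word => d.insert word (PySem.Set.ofList word.toList))
                      PySem.Dict.empty).getD wj []) ≠ [] then mp
              else max mp ((PySem.Str.len w) * (PySem.Str.len wj)))
            mp =
          (rest.map (fun w' => ((PySem.Str.len w'), pvMask w'))).foldl
            (fun b p => if pvMask w &&& p.2 == 0 && (PySem.Str.len w) * p.1 > b
              then (PySem.Str.len w) * p.1 else b) mp := by
        intro mp
        have hk1 : (0 : Int) ≤ (k : Int) + 1 := by positivity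
        have := PySem.List.foldl_pyRange_pyGetD (xs := words) (a := (k : Int) + 1) (d := "")
          (f := fun mp wj =>
            if PySem.Set.inter
                ((words.foldl (fun d word => d.insert word (PySem.Set.ofList word.toList))
                    PySem.Dict.empty).getD w [])
                ((words.foldl (fun d word => d.insert word (PySem.Set.ofList word.toList))
                    PySem.Dict.empty).getD wj []) ≠ [] then mp
            else max mp ((PySem.Str.len w) * (PySem.Str.len wj)))
          (init := mp) hk1
        simp only at this
        rw [this]
        have hcast : (((k : Int) + 1).toNat) = k + 1 := by omega
        rw [hcast, hdrop']
        rw [List.foldl_map]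
        apply PySem.List.foldl_congr_mem
        intro b wj hwj
        have hwj' : wj ∈ words := List.mem_of_mem_drop (i := k + 1) (by rw [hdrop']; exact hwj)
        simp only [pv_dict_getD, hw, hwj', if_true, PySem.Dict.getD_empty]
        exact pv_step_eq w wj b
      simp only [hinner]
      rw [List.map_cons, pvBest]
      exact ih (k + 1) (by exact_mod_cast hdrop') _

-- ---- generic facts about conditional max-accumulating folds ----
theorem pv_maxfold_le_init {α : Type} (l : List α) (c : α → Bool) (v : α → Int) (b : Int) :
    b ≤ l.foldl (fun b x => if c x then max b (v x) else b) b := by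
  induction l generalizing b with
  | nil => simp
  | cons x xs ih =>
      refine le_trans ?_ (ih _)
      by_cases hc : c x <;> simp [hc]
theorem pv_maxfold_lower {α : Type} (l : List α) (c : α → Bool) (v : α → Int) (b : Int)
    {x : α} (hx : x ∈ l) (hc : c x = true) :
    v x ≤ l.foldl (fun b x => if c x then max b (v x) else b) b := by
  induction l generalizing b with
  | nil => simp at hx
  | cons y ys ih =>
      rcases List.mem_cons.mp hx with h | h
      · subst h
        simp only [List.foldl_cons, hc, if_true]
        exact le_trans (le_max_right _ _) (pv_maxfold_le_init _ _ _ _)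
      · exact ih _ h
theorem pv_maxfold_upper {α : Type} (l : List α) (c : α → Bool) (v : α → Int) {b C : Int}
    (hb : b ≤ C) (h : ∀ x ∈ l, c x = true → v x ≤ C) :
    l.foldl (fun b x => if c x then max b (v x) else b) b ≤ C := by
  induction l generalizing b with
  | nil => simpa
  | cons x xs ih =>
      simp only [List.foldl_cons]
      refine ih ?_ (fun y hy => h y (List.mem_cons_of_mem _ hy))
      split_ifs with hcx
      · exact max_le hb (h x List.mem_cons_self hcx)
      · exact hb
-- rewrite A's guarded step into the max-accumulating shape
theorem pv_guard_eq (c : Bool) (v b : Int) :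
    (if c && v > b then v else b) = (if c then max b v else b) := by
  cases c
  · simp
  · simp only [Bool.true_and, decide_eq_true_eq, if_true]
    split_ifs <;> omega

-- ---- membership facts for pvPairs ----
theorem pv_mem_of_pvPairs {α : Type} (l : List α) (p q : α) (h : (p, q) ∈ pvPairs l) :
    p ∈ l ∧ q ∈ l := by
  induction l with
  | nil => simp [pvPairs] at h
  | cons x xs ih =>
      simp only [pvPairs, List.mem_append, List.mem_map] at h
      rcases h with ⟨y, hy, he⟩ | h
      · obtain ⟨h1, h2⟩ := Prod.mk.inj he
        subst h1; subst h2
        exact ⟨List.mem_cons_self, List.mem_cons_of_mem _ hy⟩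
      · exact ⟨List.mem_cons_of_mem _ (ih h).1, List.mem_cons_of_mem _ (ih h).2⟩
theorem pv_pvPairs_of_mem {α : Type} (l : List α) (x y : α) (hx : x ∈ l) (hy : y ∈ l)
    (hne : x ≠ y) : (x, y) ∈ pvPairs l ∨ (y, x) ∈ pvPairs l := by
  induction l with
  | nil => simp at hx
  | cons z zs ih =>
      rcases List.mem_cons.mp hx with rfl | hx'
      · have hy' : y ∈ zs := by
          rcases List.mem_cons.mp hy with rfl | h
          · exact absurd rfl hne
          · exact h
        left
        simp only [pvPairs, List.mem_append]
        exact Or.inl (List.mem_map.mpr ⟨y, hy', rfl⟩)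
      · rcases List.mem_cons.mp hy with rfl | hy'
        · right
          simp only [pvPairs, List.mem_append]
          exact Or.inl (List.mem_map.mpr ⟨x, hx', rfl⟩)
        · rcases ih hx' hy' with h | h
          · left; simp only [pvPairs, List.mem_append]; exact Or.inr h
          · right; simp only [pvPairs, List.mem_append]; exact Or.inr h
theorem pv_pvPairs_map {α β : Type} (f : α → β) (l : List α) (x y : α)
    (h : (x, y) ∈ pvPairs l) : (f x, f y) ∈ pvPairs (l.map f) := by
  induction l with
  | nil => simp [pvPairs] at h
  | cons z zs ih =>
      simp only [pvPairs, List.mem_append, List.mem_map] at h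
      rw [List.map_cons]
      simp only [pvPairs, List.mem_append]
      rcases h with ⟨w, hw, he⟩ | h
      · obtain ⟨h1, h2⟩ := Prod.mk.inj he
        subst h1; subst h2
        exact Or.inl (List.mem_map.mpr ⟨f w, List.mem_map.mpr ⟨w, hw, rfl⟩, rfl⟩)
      · exact Or.inr (ih h)

-- ---- characterization of pvBest ----
theorem pvBest_le_init (lm : List (Int × Nat)) (b : Int) : b ≤ pvBest lm b := by
  induction lm generalizing b with
  | nil => simp [pvBest]
  | cons p lm ih =>
      obtain ⟨l1, m1⟩ := p
      simp only [pvBest]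
      refine le_trans ?_ (ih _)
      simp only [pv_guard_eq]
      exact pv_maxfold_le_init _ _ _ _
theorem pvBest_lower (lm : List (Int × Nat)) (b : Int) (p q : Int × Nat)
    (h : (p, q) ∈ pvPairs lm) (hd : p.2 &&& q.2 = 0) : p.1 * q.1 ≤ pvBest lm b := by
  induction lm generalizing b with
  | nil => simp [pvPairs] at h
  | cons r lm ih =>
      obtain ⟨l1, m1⟩ := r
      simp only [pvBest, pv_guard_eq]
      simp only [pvPairs, List.mem_append, List.mem_map] at h
      rcases h with ⟨y, hy, he⟩ | h
      · obtain ⟨h1, h2⟩ := Prod.mk.inj he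
        subst h1; subst h2
        refine le_trans ?_ (pvBest_le_init _ _)
        exact pv_maxfold_lower lm _ (fun x => l1 * x.1) b hy (by simpa using hd)
      · exact ih _ h
theorem pvBest_upper (lm : List (Int × Nat)) {b C : Int} (hb : b ≤ C)
    (h : ∀ p q : Int × Nat, (p, q) ∈ pvPairs lm → p.2 &&& q.2 = 0 → p.1 * q.1 ≤ C) :
    pvBest lm b ≤ C := by
  induction lm generalizing b with
  | nil => simpa [pvBest]
  | cons r lm ih =>
      obtain ⟨l1, m1⟩ := r
      simp only [pvBest, pv_guard_eq]
      refine ih ?_ (fun p q hpq => h p q (by simp [pvPairs, hpq]))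
      refine pv_maxfold_upper _ _ _ hb ?_
      intro x hx hcx
      exact h (l1, m1) x
        (by simp only [pvPairs, List.mem_append]
            exact Or.inl (List.mem_map.mpr ⟨x, hx, rfl⟩)) (by simpa using hcx)

-- ---- generic facts about the B-side double fold (inner fold is max-accumulating) ----
theorem pv_fold_le_init {α : Type} (l : List α) (g : Int → α → Int)
    (hg : ∀ b x, b ≤ g b x) (b : Int) : b ≤ l.foldl g b := by
  induction l generalizing b with
  | nil => simp
  | cons x xs ih => exact le_trans (hg b x) (ih _)
theorem pv_fold_lower {α : Type} (l : List α) (g : Int → α → Int)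
    (hle : ∀ b x, b ≤ g b x) (v : Int) {x : α} (hx : x ∈ l) (hv : ∀ b, v ≤ g b x) (b : Int) :
    v ≤ l.foldl g b := by
  induction l generalizing b with
  | nil => simp at hx
  | cons y ys ih =>
      rcases List.mem_cons.mp hx with rfl | h
      · exact le_trans (hv b) (pv_fold_le_init _ _ hle _)
      · exact ih h _
theorem pv_fold_upper {α : Type} (l : List α) (g : Int → α → Int) {C : Int}
    (hstep : ∀ b x, b ≤ C → x ∈ l → g b x ≤ C) {b : Int} (hb : b ≤ C) :
    l.foldl g b ≤ C := by
  induction l generalizing b with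
  | nil => simpa
  | cons x xs ih =>
      exact ih (fun b y hbC hy => hstep b y hbC (List.mem_cons_of_mem _ hy))
        (hstep b x hb List.mem_cons_self)

-- ---- invariants of the best_len dict built by B ----
theorem pv_bdict_items_src (ws : List String) (d : PySem.Dict Nat Int) (p : Nat × Int)
    (hp : p ∈ (ws.foldl
        (fun d w =>
          if PySem.Str.len w > d.getD (pvMask w) 0 then d.insert (pvMask w) (PySem.Str.len w) else d)
        d).items) :
    (∃ w ∈ ws, p = (pvMask w, PySem.Str.len w)) ∨ p ∈ d.items := by
  induction ws generalizing d with
  | nil => exact Or.inr hp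
  | cons w ws ih =>
      rw [List.foldl_cons] at hp
      rcases ih _ hp with ⟨w', hw', he⟩ | h
      · exact Or.inl ⟨w', List.mem_cons_of_mem _ hw', he⟩
      · split_ifs at h with hc
        · rcases (PySem.Dict.mem_items_insert _ _ _ _).mp h with he | ⟨hmem, _⟩
          · exact Or.inl ⟨w, List.mem_cons_self, he⟩
          · exact Or.inr hmem
        · exact Or.inr h
theorem pv_bdict_getD_mono (ws : List String) (d : PySem.Dict Nat Int) (k : Nat) :
    d.getD k 0 ≤ (ws.foldl
        (fun d w =>
          if PySem.Str.len w > d.getD (pvMask w) 0 then d.insert (pvMask w) (PySem.Str.len w) else d)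
        d).getD k 0 := by
  induction ws generalizing d with
  | nil => simp
  | cons w ws ih =>
      rw [List.foldl_cons]
      refine le_trans ?_ (ih _)
      split_ifs with hc
      · rw [PySem.Dict.getD_insert]
        split_ifs with hk
        · subst hk; omega
        · exact le_refl _
      · exact le_refl _
theorem pv_bdict_getD_ge_len (ws : List String) (d : PySem.Dict Nat Int) (w : String)
    (hw : w ∈ ws) :
    PySem.Str.len w ≤ (ws.foldl
        (fun d w =>
          if PySem.Str.len w > d.getD (pvMask w) 0 then d.insert (pvMask w) (PySem.Str.len w) else d)
        d).getD (pvMask w) 0 := by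
  induction ws generalizing d with
  | nil => simp at hw
  | cons x xs ih =>
      rw [List.foldl_cons]
      rcases List.mem_cons.mp hw with rfl | h
      · refine le_trans ?_ (pv_bdict_getD_mono xs _ (pvMask w))
        split_ifs with hc
        · rw [PySem.Dict.getD_insert_self]
        · omega
      · exact ih _ h

-- Python len is nonnegative
theorem pv_len_nonneg (w : String) : 0 ≤ PySem.Str.len w := by
  rw [PySem.Str.len_eq]; positivity

-- ===== final assembly =====
theorem pv_final (words : List String) :
    maxProductNaive_py words = maxProductNaive_py_alt words := by
  have hA : maxProductNaive_py words =
      pvBest (words.map (fun w => ((PySem.Str.len w), pvMask w))) 0 := by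
    unfold maxProductNaive_py
    exact pv_main words words 0 (by simp) 0
  rw [hA]
  unfold maxProductNaive_py_alt
  set d := words.foldl
      (fun d w =>
        if PySem.Str.len w > d.getD (pvMask w) 0 then d.insert (pvMask w) (PySem.Str.len w) else d)
      PySem.Dict.empty with hd
  set lm := words.map (fun w => ((PySem.Str.len w), pvMask w)) with hlm
  -- shape facts for the double fold over d.items
  have hle : ∀ (b : Int) (p1 : Nat × Int),
      b ≤ d.items.foldl
          (fun b p2 => if p1.1 &&& p2.1 == 0 then max b (p1.2 * p2.2) else b) b := by
    intro b p1
    exact pv_maxfold_le_init _ _ _ _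
  apply le_antisymm
  · -- A ≤ B
    refine pvBest_upper lm (by
      refine pv_fold_le_init _ _ (fun b p1 => hle b p1) 0) ?_
    intro p q hpq hdisj
    obtain ⟨hp, hq⟩ := pv_mem_of_pvPairs lm p q hpq
    rw [hlm] at hp hq
    obtain ⟨w1, hw1, rfl⟩ := List.mem_map.mp hp
    obtain ⟨w2, hw2, rfl⟩ := List.mem_map.mp hq
    simp only at hdisj ⊢
    by_cases hz : PySem.Str.len w1 = 0 ∨ PySem.Str.len w2 = 0
    · have hz0 : PySem.Str.len w1 * PySem.Str.len w2 = 0 := by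
        rcases hz with h | h
        · rw [h, zero_mul]
        · rw [h, mul_zero]
      rw [hz0]
      exact pv_fold_le_init _ _ (fun b p1 => hle b p1) 0
    · rw [not_or] at hz
      have h1 : 0 < PySem.Str.len w1 := lt_of_le_of_ne (pv_len_nonneg w1) (Ne.symm hz.1)
      have h2 : 0 < PySem.Str.len w2 := lt_of_le_of_ne (pv_len_nonneg w2) (Ne.symm hz.2)
      have hg1 := pv_bdict_getD_ge_len words PySem.Dict.empty w1 hw1
      have hg2 := pv_bdict_getD_ge_len words PySem.Dict.empty w2 hw2
      rw [← hd] at hg1 hg2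
      -- the two dict entries exist because the stored values are positive
      have hi1 : (pvMask w1, d.getD (pvMask w1) 0) ∈ d.items := by
        have hpos : d.getD (pvMask w1) 0 ≠ 0 := by omega
        cases hg : d.get? (pvMask w1) with
        | none => exact absurd (PySem.Dict.getD_of_get?_eq_none d 0 hg) hpos
        | some v =>
            rw [PySem.Dict.getD_of_get?_eq_some d 0 hg]
            exact PySem.Dict.mem_items_of_get?_eq_some d hg
      have hi2 : (pvMask w2, d.getD (pvMask w2) 0) ∈ d.items := by
        have hpos : d.getD (pvMask w2) 0 ≠ 0 := by omega
        cases hg : d.get? (pvMask w2) with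
        | none => exact absurd (PySem.Dict.getD_of_get?_eq_none d 0 hg) hpos
        | some v =>
            rw [PySem.Dict.getD_of_get?_eq_some d 0 hg]
            exact PySem.Dict.mem_items_of_get?_eq_some d hg
      have hcand : d.getD (pvMask w1) 0 * d.getD (pvMask w2) 0 ≤
          d.items.foldl
            (fun best p1 => d.items.foldl
              (fun b p2 => if p1.1 &&& p2.1 == 0 then max b (p1.2 * p2.2) else b) best) 0 := by
        refine pv_fold_lower _ _ (fun b p1 => hle b p1) _ hi1 ?_ 0
        intro b
        refine le_trans ?_ (pv_maxfold_lower d.items _ _ b hi2 (by simpa using hdisj))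
        simp
      refine le_trans ?_ hcand
      exact mul_le_mul hg1 hg2 (le_of_lt h2) (le_trans (le_of_lt h1) hg1)
  · -- B ≤ A
    refine pv_fold_upper _ _ ?_ (pvBest_le_init lm 0)
    intro b p1 hbC hp1
    refine pv_maxfold_upper _ _ _ hbC ?_
    intro p2 hp2 hc
    have hdisj : p1.1 &&& p2.1 = 0 := by simpa using hc
    rcases pv_bdict_items_src words PySem.Dict.empty p1 (hd ▸ hp1) with ⟨w1, hw1, rfl⟩ | h
    · rcases pv_bdict_items_src words PySem.Dict.empty p2 (hd ▸ hp2) with ⟨w2, hw2, rfl⟩ | h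
      · simp only at hdisj ⊢
        by_cases hmm : pvMask w1 = pvMask w2
        · -- same mask, disjoint with itself ⇒ empty word ⇒ product 0
          have hm0 : pvMask w1 = 0 := by
            rw [hmm] at hdisj ⊢; simpa using hdisj
          have : PySem.Str.len w1 = 0 := by
            rw [PySem.Str.len_eq, pv_mask_eq_zero w1 hm0]; simp
          rw [this, zero_mul]
          exact pvBest_le_init lm 0
        · have hne : w1 ≠ w2 := fun he => hmm (he ▸ rfl)
          rcases pv_pvPairs_of_mem words w1 w2 hw1 hw2 hne with hpr | hpr
          · exact pvBest_lower lm 0 _ _ (hlm ▸ pv_pvPairs_map _ words w1 w2 hpr)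
              (by simpa using hdisj)
          · have := pvBest_lower lm 0 _ _ (hlm ▸ pv_pvPairs_map _ words w2 w1 hpr)
              (by simp; rw [Nat.and_comm]; simpa using hdisj)
            calc PySem.Str.len w1 * PySem.Str.len w2
                = PySem.Str.len w2 * PySem.Str.len w1 := mul_comm _ _
              _ ≤ pvBest lm 0 := this
      · simp [PySem.Dict.empty] at h
    · simp [PySem.Dict.empty] at h

-- ===== VERDICT (by name: the statement is the Claim_ definition above) =====
theorem maxProductNaive_py_spec : Claim_equal_maxProductNaive_py := by
  intro words _
  unfold Spec_maxProductNaive_py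
  exact pv_final words
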